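-- pv_equiv track=rewrite | github.com/bin5go/Lang_eng | learning_tool/quiz_builder.py | distribute_sections
-- ===== SOURCE A (Python) =====
-- def distribute_sections(quiz_words: list[dict]) -> dict[str, list[dict]]:
--     """
--     Split 15 words into sections A–D.
--     Academic words are swapped toward Section D slots (positions 13–14)
--     so that real-world prompts feature academic vocabulary where possible.
--     """
--     words = list(quiz_words)
--     for target in [13, 14]:
--         if target >= len(words):
--             break
--         if not words[target]["academic"]:
--             for src in range(min(13, len(words))):
--                 if words[src]["academic"]:
--                     words[target], words[src] = words[src], words[target]
--                     break
--     return {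
--         "A": words[0:5],
--         "B": words[5:10],
--         "C": words[10:13],
--         "D": words[13 : min(15, len(words))],
--     }
-- ===== SOURCE B (Python) =====
-- def distribute_sections(quiz_words: list[dict]) -> dict[str, list[dict]]:
--     """Plan-then-execute rewrite: compute the non-academic Section-D slots,
--     collect just enough academic source indices in one pass, then swap."""
--     words = list(quiz_words)
--     n = len(words)
--     targets = [t for t in (13, 14) if t < n and not words[t]["academic"]]
--     sources = []
--     for i in range(min(13, n)):
--         if len(sources) == len(targets):
--             break
--         if words[i]["academic"]:
--             sources.append(i)
--     for t, s in zip(targets, sources):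
--         words[t], words[s] = words[s], words[t]
--     return {
--         "A": words[0:5],
--         "B": words[5:10],
--         "C": words[10:13],
--         "D": words[13 : min(15, n)],
--     }
-- ===== Notes on version B (the rewrite author's own statement) =====
-- stated objective: alternative
-- what changed: A interleaves per-target conditional rescans of the list (scanning mutated state for the second target); B plans first - it computes the list of non-academic in-bounds D-slots, collects just enough academic source indices in one bounded pass, and applies the swaps by zipping targets with sources.
import Mathlib
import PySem

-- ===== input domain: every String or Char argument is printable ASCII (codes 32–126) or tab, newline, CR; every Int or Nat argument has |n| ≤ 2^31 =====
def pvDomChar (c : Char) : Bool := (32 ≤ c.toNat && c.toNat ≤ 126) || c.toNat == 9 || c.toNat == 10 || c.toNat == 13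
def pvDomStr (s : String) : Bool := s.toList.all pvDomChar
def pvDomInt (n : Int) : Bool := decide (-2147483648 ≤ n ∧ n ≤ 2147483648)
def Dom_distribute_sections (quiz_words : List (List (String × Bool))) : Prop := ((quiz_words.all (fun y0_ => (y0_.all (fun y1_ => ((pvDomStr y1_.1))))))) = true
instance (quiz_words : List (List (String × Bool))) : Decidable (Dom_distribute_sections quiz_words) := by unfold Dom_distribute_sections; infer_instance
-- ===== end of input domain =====

-- B re-implements A by planning (targets list + source queue) instead of A's per-target rescans;
-- equal return value on Pre_ (the stated no-KeyError domain). Neither port mutates its argument.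

-- words[i]["academic"] as a Bool: dict lookup is first match in the association list.
-- (Total helper; out-of-range index / missing key read as a non-academic word — Pre_ excludes
-- the inputs where Python would raise, so both ports are exact there.)
def pvAcad (ws : List (List (String × Bool))) (i : Nat) : Bool :=
  ((ws.getD i []).lookup "academic").getD false

-- words[t], words[s] = words[s], words[t]
def pvSwap (ws : List (List (String × Bool))) (t s : Nat) : List (List (String × Bool)) :=
  let a := ws.getD t []
  let b := ws.getD s []
  (ws.set t b).set s a

-- ===== PORT A =====
-- inner 'for src in range(min(13, len(words))): if words[src]["academic"]: swap; break'
def pvScanA (ws : List (List (String × Bool))) (t : Nat) : List Nat → List (List (String × Bool))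
  | [] => ws
  | s :: rest => if pvAcad ws s then pvSwap ws t s else pvScanA ws t rest

-- outer 'for target in [13, 14]' with the break on target >= len(words)
def pvOuterA (ws : List (List (String × Bool))) : List Nat → List (List (String × Bool))
  | [] => ws
  | t :: rest =>
      if ws.length ≤ t then ws
      else pvOuterA (if pvAcad ws t then ws
                     else pvScanA ws t (List.range (min 13 ws.length))) rest

def distribute_sections (quiz_words : List (List (String × Bool))) : List (String × List (List (String × Bool))) :=
  let words := pvOuterA quiz_words [13, 14]
  [("A", PySem.List.slice words (some 0) (some 5)),
   ("B", PySem.List.slice words (some 5) (some 10)),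
   ("C", PySem.List.slice words (some 10) (some 13)),
   ("D", PySem.List.slice words (some 13) (some (min 15 (words.length : Int))))]

-- ===== PORT B =====
-- targets = [t for t in (13, 14) if t < n and not words[t]["academic"]]
def pvTargetsB (ws : List (List (String × Bool))) : List Nat :=
  [13, 14].filter (fun t => decide (t < ws.length) && !pvAcad ws t)

-- the bounded collecting pass with its 'len(sources) == len(targets)' break
def pvCollectB (ws : List (List (String × Bool))) (tlen : Nat) : List Nat → List Nat → List Nat
  | [], acc => acc
  | i :: rest, acc =>
      if acc.length = tlen then acc
      else if pvAcad ws i then pvCollectB ws tlen rest (acc ++ [i])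
      else pvCollectB ws tlen rest acc

def distribute_sections_alt (quiz_words : List (List (String × Bool))) : List (String × List (List (String × Bool))) :=
  let n := quiz_words.length
  let targets := pvTargetsB quiz_words
  let sources := pvCollectB quiz_words targets.length (List.range (min 13 n)) []
  let words := (targets.zip sources).foldl (fun w p => pvSwap w p.1 p.2) quiz_words
  [("A", PySem.List.slice words (some 0) (some 5)),
   ("B", PySem.List.slice words (some 5) (some 10)),
   ("C", PySem.List.slice words (some 10) (some 13)),
   ("D", PySem.List.slice words (some 13) (some (min 15 (n : Int))))]

-- ===== PRECONDITION & SPEC =====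
-- Pre_ excludes the inputs where Python raises KeyError (a read word without the "academic" key)
-- plus, stated a bit wider for readability: with ≥ 14 words it asks the key of every word among the
-- first 15, although A skips the dicts after the first academic hit of a scan (an artefact of its
-- scan order); with ≤ 13 words A reads no dict at all, so nothing is required.
def Pre_distribute_sections (quiz_words : List (List (String × Bool))) : Prop :=
  quiz_words.length ≤ 13 ∨ ∀ d ∈ quiz_words.take 15, (d.lookup "academic").isSome = true
instance (quiz_words : List (List (String × Bool))) : Decidable (Pre_distribute_sections quiz_words) := by
  unfold Pre_distribute_sections; infer_instance

def pvWitness_distribute_sections : (List (List (String × Bool))) := [[("academic", true)], [("word", false)]]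

def Spec_distribute_sections (quiz_words : List (List (String × Bool))) (out : List (String × List (List (String × Bool)))) : Prop := out = distribute_sections_alt quiz_words
instance (quiz_words : List (List (String × Bool))) (out : List (String × List (List (String × Bool)))) : Decidable (Spec_distribute_sections quiz_words out) := by unfold Spec_distribute_sections; infer_instance

-- ===== CLAIM (what is proved, stated in full; the proofs are below) =====
def Claim_equal_distribute_sections : Prop := ∀ (quiz_words : List (List (String × Bool))), Dom_distribute_sections quiz_words → Pre_distribute_sections quiz_words → Spec_distribute_sections quiz_words (distribute_sections quiz_words)

-- ===== LEMMAS AND PROOFS =====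

theorem length_pvSwap (ws : List (List (String × Bool))) (t s : Nat) :
    (pvSwap ws t s).length = ws.length := by
  simp [pvSwap]

-- A's inner scan is: swap with the first academic index, if any.
theorem pvScanA_eq_find? (ws : List (List (String × Bool))) (t : Nat) (l : List Nat) :
    pvScanA ws t l = match l.find? (pvAcad ws) with
      | none => ws
      | some s => pvSwap ws t s := by
  induction l with
  | nil => simp [pvScanA]
  | cons s rest ih =>
      by_cases h : pvAcad ws s = true <;> simp [pvScanA, List.find?, h, ih]

-- B's collecting pass gathers the first (tlen - |acc|) academic indices.
theorem pvCollectB_eq_take (ws : List (List (String × Bool))) (tlen : Nat) (l : List Nat) :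
    ∀ acc, acc.length ≤ tlen →
      pvCollectB ws tlen l acc = acc ++ (l.filter (pvAcad ws)).take (tlen - acc.length) := by
  induction l with
  | nil => intro acc _; simp [pvCollectB]
  | cons i rest ih =>
      intro acc hle
      by_cases hfull : acc.length = tlen
      · simp [pvCollectB, hfull]
      · have hlt : acc.length < tlen := lt_of_le_of_ne hle hfull
        by_cases hi : pvAcad ws i = true
        · have := ih (acc ++ [i]) (by simp; omega)
          simp [pvCollectB, hfull, hi, this]
          rw [List.take_cons (by omega : 0 < tlen - acc.length)]
          simp
          omega
        · have := ih acc hle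
          simp [pvCollectB, hfull, hi, this]

-- removing the unique first hit from a duplicate-free list's filter
theorem filter_drop_first {k1 : Nat} {p : Nat → Bool} {l rest : List Nat}
    (hl : l.Nodup) (h : l.filter p = k1 :: rest) :
    l.filter (fun i => !(i == k1) && p i) = rest := by
  induction l with
  | nil => simp at h
  | cons a l' ih =>
      rcases List.nodup_cons.mp hl with ⟨ha, hl'⟩
      by_cases hpa : p a = true
      · rw [List.filter_cons_of_pos hpa] at h
        obtain ⟨rfl, hrest⟩ : a = k1 ∧ l'.filter p = rest := by
          constructor <;> simp_all
        rw [List.filter_cons_of_neg (by simp)]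
        rw [← hrest]
        apply List.filter_congr
        intro i hi
        have : i ≠ a := fun hia => ha (hia ▸ hi)
        simp [this]
      · rw [List.filter_cons_of_neg hpa] at h
        rw [List.filter_cons_of_neg (by simp [hpa])]
        exact ih hl' h

-- after the first swap (target 13, source k1 < 13), the academic test on indices < 13
-- is the old one minus k1, and index 14 is untouched
theorem pvAcad_swap_lt (ws : List (List (String × Bool))) (k1 i : Nat)
    (hi : i < 13) (hik : i ≠ k1) :
    pvAcad (pvSwap ws 13 k1) i = pvAcad ws i := by
  simp only [pvAcad, pvSwap, List.getD_eq_getElem?_getD]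
  rw [List.getElem?_set_ne (by omega), List.getElem?_set_ne (by omega)]

theorem pvAcad_swap_self (ws : List (List (String × Bool))) (k1 : Nat)
    (hk1 : k1 < 13) (hlen : 13 < ws.length) :
    pvAcad (pvSwap ws 13 k1) k1 = pvAcad ws 13 := by
  simp only [pvAcad, pvSwap, List.getD_eq_getElem?_getD]
  rw [List.getElem?_set_self (by simp; omega)]
  simp

theorem pvAcad_swap_14 (ws : List (List (String × Bool))) (k1 : Nat) (hk1 : k1 < 13) :
    pvAcad (pvSwap ws 13 k1) 14 = pvAcad ws 14 := by
  simp only [pvAcad, pvSwap, List.getD_eq_getElem?_getD]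
  rw [List.getElem?_set_ne (by omega), List.getElem?_set_ne (by omega)]

theorem filter_swap (ws : List (List (String × Bool))) (k1 : Nat) (rest : List Nat)
    (hlen : 13 < ws.length) (h13 : pvAcad ws 13 = false)
    (h : (List.range 13).filter (pvAcad ws) = k1 :: rest) :
    (List.range 13).filter (pvAcad (pvSwap ws 13 k1)) = rest := by
  have hk1 : k1 < 13 := by
    have : k1 ∈ (List.range 13).filter (pvAcad ws) := by simp [h]
    have := List.mem_of_mem_filter this
    simpa using this
  have hcongr : (List.range 13).filter (pvAcad (pvSwap ws 13 k1))
      = (List.range 13).filter (fun i => !(i == k1) && pvAcad ws i) := by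
    apply List.filter_congr
    intro i hi
    have hi13 : i < 13 := by simpa using hi
    by_cases hik : i = k1
    · subst hik
      simp [pvAcad_swap_self ws i hi13 hlen, h13]
    · simp [pvAcad_swap_lt ws k1 i hi13 hik, hik]
  rw [hcongr]
  exact filter_drop_first (List.nodup_range) h

-- the words A ends with = the words B ends with
theorem words_eq (ws : List (List (String × Bool))) :
    pvOuterA ws [13, 14]
      = (((pvTargetsB ws).zip
            (pvCollectB ws (pvTargetsB ws).length (List.range (min 13 ws.length)) [])).foldl
          (fun w p => pvSwap w p.1 p.2) ws) := by
  by_cases h13 : 13 < ws.length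
  · have hmin : min 13 ws.length = 13 := by omega
    by_cases h14 : 14 < ws.length
    · -- both targets in bounds
      by_cases a13 : pvAcad ws 13 = true
      · by_cases a14 : pvAcad ws 14 = true
        · -- no targets
          simp [pvOuterA, pvTargetsB, a13, a14,
                Nat.not_le.mpr h14]
        · -- target 14 only
          have htg : pvTargetsB ws = [14] := by
            simp [pvTargetsB, h13, h14, a13, a14]
          rw [htg]
          have hc := pvCollectB_eq_take ws 1 (List.range (min 13 ws.length)) [] (by simp)
          rw [hmin] at hc ⊢
          cases hF : (List.range 13).filter (pvAcad ws) with
          | nil =>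
              simp [hF] at hc
              simp [pvOuterA, a13, a14, Nat.not_le.mpr h13, Nat.not_le.mpr h14,
                    pvScanA_eq_find?, ← List.head?_filter, hF, hmin, hc]
          | cons k1 r =>
              simp [hF] at hc
              simp [pvOuterA, a13, a14, Nat.not_le.mpr h13, Nat.not_le.mpr h14,
                    pvScanA_eq_find?, ← List.head?_filter, hF, hmin, hc]
      · -- target 13 is a target
        by_cases a14 : pvAcad ws 14 = true
        · -- target 13 only
          have htg : pvTargetsB ws = [13] := by
            simp [pvTargetsB, h13, h14, a13, a14]
          rw [htg]
          have hc := pvCollectB_eq_take ws 1 (List.range (min 13 ws.length)) [] (by simp)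
          rw [hmin] at hc ⊢
          cases hF : (List.range 13).filter (pvAcad ws) with
          | nil =>
              simp [hF] at hc
              have hfind : (List.range 13).find? (pvAcad ws) = none := by
                rw [← List.head?_filter]; rw [hF]; rfl
              simp [pvOuterA, a13, a14, Nat.not_le.mpr h13, Nat.not_le.mpr h14,
                    pvScanA_eq_find?, hfind, hmin, hc]
          | cons k1 r =>
              simp [hF] at hc
              have hfind : (List.range 13).find? (pvAcad ws) = some k1 := by
                rw [← List.head?_filter]; rw [hF]; rfl
              have hk1 : k1 < 13 := by
                have : k1 ∈ (List.range 13).filter (pvAcad ws) := by simp [hF]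
                simpa using List.mem_of_mem_filter this
              have ha14' : pvAcad (pvSwap ws 13 k1) 14 = true := by
                rw [pvAcad_swap_14 ws k1 hk1]; exact a14
              simp [pvOuterA, a13, Nat.not_le.mpr h13, Nat.not_le.mpr h14,
                    pvScanA_eq_find?, hfind, hmin, hc, length_pvSwap, ha14']
        · -- both targets
          have htg : pvTargetsB ws = [13, 14] := by
            simp [pvTargetsB, h13, h14, a13, a14]
          rw [htg]
          have hc := pvCollectB_eq_take ws 2 (List.range (min 13 ws.length)) [] (by simp)
          rw [hmin] at hc ⊢
          cases hF : (List.range 13).filter (pvAcad ws) with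
          | nil =>
              simp [hF] at hc
              have hfind : (List.range 13).find? (pvAcad ws) = none := by
                rw [← List.head?_filter]; rw [hF]; rfl
              simp [pvOuterA, a13, a14, Nat.not_le.mpr h13, Nat.not_le.mpr h14,
                    pvScanA_eq_find?, hfind, hmin, hc]
          | cons k1 r =>
              have hfind : (List.range 13).find? (pvAcad ws) = some k1 := by
                rw [← List.head?_filter]; rw [hF]; rfl
              have hk1 : k1 < 13 := by
                have : k1 ∈ (List.range 13).filter (pvAcad ws) := by simp [hF]
                simpa using List.mem_of_mem_filter this
              have ha14' : pvAcad (pvSwap ws 13 k1) 14 = pvAcad ws 14 :=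
                pvAcad_swap_14 ws k1 hk1
              have hF' : (List.range 13).filter (pvAcad (pvSwap ws 13 k1)) = r :=
                filter_swap ws k1 r h13 (by simpa using a13) hF
              have hfind' : (List.range 13).find? (pvAcad (pvSwap ws 13 k1)) = r.head? := by
                rw [← List.head?_filter, hF']
              cases r with
              | nil =>
                  simp [hF] at hc
                  simp [pvOuterA, a13, a14, Nat.not_le.mpr h13, Nat.not_le.mpr h14,
                        pvScanA_eq_find?, hfind, hmin, hc, length_pvSwap, ha14', hfind']
              | cons k2 r' =>
                  simp [hF] at hc
                  simp [pvOuterA, a13, a14, Nat.not_le.mpr h13, Nat.not_le.mpr h14,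
                        pvScanA_eq_find?, hfind, hmin, hc, length_pvSwap, ha14', hfind']
    · -- length = 14: target 14 breaks
      by_cases a13 : pvAcad ws 13 = true
      · simp [pvOuterA, pvTargetsB, a13, h13, h14, Nat.not_le.mpr h13,
              Nat.le_of_not_lt h14]
      · have htg : pvTargetsB ws = [13] := by
          simp [pvTargetsB, h13, h14, a13]
        rw [htg]
        have hc := pvCollectB_eq_take ws 1 (List.range (min 13 ws.length)) [] (by simp)
        rw [hmin] at hc ⊢
        cases hF : (List.range 13).filter (pvAcad ws) with
        | nil =>
            simp [hF] at hc
            have hfind : (List.range 13).find? (pvAcad ws) = none := by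
              rw [← List.head?_filter]; rw [hF]; rfl
            simp [pvOuterA, a13, Nat.not_le.mpr h13, Nat.le_of_not_lt h14,
                  pvScanA_eq_find?, hfind, hmin, hc]
        | cons k1 r =>
            simp [hF] at hc
            have hfind : (List.range 13).find? (pvAcad ws) = some k1 := by
              rw [← List.head?_filter]; rw [hF]; rfl
            simp [pvOuterA, a13, Nat.not_le.mpr h13, Nat.le_of_not_lt h14,
                  pvScanA_eq_find?, hfind, hmin, hc, length_pvSwap]
  · -- length ≤ 13: nothing happens on either side
    have h14 : ¬ 14 < ws.length := by omega
    simp [pvOuterA, pvTargetsB, Nat.le_of_not_lt h13, h14]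

theorem length_words_B (ws : List (List (String × Bool))) (pairs : List (Nat × Nat)) :
    (pairs.foldl (fun w p => pvSwap w p.1 p.2) ws).length = ws.length := by
  induction pairs generalizing ws with
  | nil => rfl
  | cons p rest ih => simp [List.foldl_cons, ih, length_pvSwap]

-- ===== VERDICT (by name: the statement is the Claim_ definition above) =====
theorem distribute_sections_spec : Claim_equal_distribute_sections := by
  intro ws _ _
  unfold Spec_distribute_sections distribute_sections distribute_sections_alt
  simp only [words_eq ws, length_words_B]
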